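-- pv_equiv track=rewrite | github.com/JohnnyLiang1018/CS156Team6TetrisAI | search.py | get_max_height
-- ===== SOURCE A (Python) =====
-- def get_max_height(board):
--     height = len(board)
--     width = len(board[0])
--     max_height = 0
--     for j in range(height):
--         for i in range(width):
--             if (board[j][i] == 1):
--                 max_height = height - j
--                 return max_height
--     return max_height
-- ===== SOURCE B (Python) =====
-- def get_max_height(board):
--     height = len(board)
--     width = len(board[0])
--     best = 0
--     for i in range(width):
--         for j in range(height):
--             if board[j][i] == 1:
--                 best = max(best, height - j)
--                 break
--     return best
-- ===== Notes on version B (the rewrite author's own statement) =====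
-- stated objective: alternative
-- what changed: Replaces A's row-major early-returning scan by a column-major decomposition: B computes each column's stack height (height minus the topmost filled row) and returns the running maximum over columns, instead of returning at the first filled cell in row order.
-- outside the precondition, e.g. on get_max_height([[63, 2, 1], [109], [2, 1], []]): A returns 4, B raises IndexError; on get_max_height([[1], []]): A returns 2, B returns 2
import Mathlib
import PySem

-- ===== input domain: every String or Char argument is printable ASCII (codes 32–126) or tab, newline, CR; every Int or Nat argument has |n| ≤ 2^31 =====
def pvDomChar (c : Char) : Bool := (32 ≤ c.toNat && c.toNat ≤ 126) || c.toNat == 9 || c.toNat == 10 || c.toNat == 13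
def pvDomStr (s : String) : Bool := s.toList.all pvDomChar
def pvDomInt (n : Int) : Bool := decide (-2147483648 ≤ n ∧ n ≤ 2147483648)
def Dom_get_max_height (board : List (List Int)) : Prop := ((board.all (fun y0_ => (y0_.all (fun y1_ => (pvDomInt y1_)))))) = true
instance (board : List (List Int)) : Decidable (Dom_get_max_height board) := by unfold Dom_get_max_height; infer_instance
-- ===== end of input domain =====

-- B recomputes the same value by a column-major decomposition (per-column stack height,
-- running maximum) instead of A's row-major early-returning scan; objective: alternative.

-- B recomputes the same value by a column-major decomposition (per-column stack height,
-- running maximum) instead of A's row-major early-returning scan; objective: alternative.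

-- ===== PORT A =====
-- "board[j][i] == 1" of A's inner loop (in range under Pre_, so getD is exact)
def pvCell (i : Nat) (row : List Int) : Bool := row.getD i 0 == 1

-- inner loop "for i in range(width): if board[j][i] == 1" (early exit on first hit)
def pvRowHit (width : Nat) (row : List Int) : Bool :=
  (List.range width).any (fun i => pvCell i row)

-- outer loop "for j in range(height)" with the early return "return height - j"
def pvGoA (height : Int) (width : Nat) : List (List Int) → Int → Int
  | [], _ => 0
  | row :: rest, j => if pvRowHit width row then height - j else pvGoA height width rest (j + 1)

def get_max_height (board : List (List Int)) : Int :=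
  pvGoA (board.length : Int) (board.headD []).length board 0

-- ===== PORT B =====
-- inner loop of B: scan column i top-down, stop at the first filled cell ("break")
def pvColH (height : Int) (i : Nat) : List (List Int) → Int → Int
  | [], _ => 0
  | row :: rest, j => if pvCell i row then height - j else pvColH height i rest (j + 1)

def get_max_height_alt (board : List (List Int)) : Int :=
  (List.range (board.headD []).length).foldl
    (fun best i => max best (pvColH (board.length : Int) i board 0)) 0

-- ===== PRECONDITION & SPEC =====
-- Pre_ excludes the empty board (board[0] raises IndexError in both programs) and ragged
-- boards with a row shorter than the first row, on which both programs raise IndexError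
-- mid-scan unless a filled cell happens to be found first (an accident of scan order).
def Pre_get_max_height (board : List (List Int)) : Prop :=
  board ≠ [] ∧ ∀ row ∈ board, (board.headD []).length ≤ row.length
instance (board : List (List Int)) : Decidable (Pre_get_max_height board) := by
  unfold Pre_get_max_height; infer_instance

def pvWitness_get_max_height : List (List Int) := [[0, 0], [1, 0], [1, 1]]

def Spec_get_max_height (board : List (List Int)) (out : Int) : Prop := out = get_max_height_alt board
instance (board : List (List Int)) (out : Int) : Decidable (Spec_get_max_height board out) := by
  unfold Spec_get_max_height; infer_instance

-- ===== CLAIM (what is proved, stated in full; the proofs are below) =====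
def Claim_equal_get_max_height : Prop := ∀ (board : List (List Int)), Dom_get_max_height board → Pre_get_max_height board → Spec_get_max_height board (get_max_height board)

-- ===== LEMMAS AND PROOFS =====

-- A's loop returns height - (index of the first row containing a hit), else 0
theorem pvGoA_char (height : Int) (width : Nat) (rows : List (List Int)) (j : Int) :
    pvGoA height width rows j =
      match rows.findIdx? (pvRowHit width) with
      | some k => height - (j + k)
      | none => 0 := by
  induction rows generalizing j with
  | nil => simp [pvGoA]
  | cons row rest ih =>
    by_cases h : pvRowHit width row
    · rw [pvGoA, if_pos h, List.findIdx?_cons, if_pos h]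
      simp
    · rw [pvGoA, if_neg h, List.findIdx?_cons, if_neg h, ih]
      cases hf : rest.findIdx? (pvRowHit width) with
      | none => simp
      | some k => simp; ring

-- B's column scan returns height - (index of the first row filled at column i), else 0
theorem pvColH_char (height : Int) (i : Nat) (rows : List (List Int)) (j : Int) :
    pvColH height i rows j =
      match rows.findIdx? (pvCell i) with
      | some k => height - (j + k)
      | none => 0 := by
  induction rows generalizing j with
  | nil => simp [pvColH]
  | cons row rest ih =>
    by_cases h : pvCell i row
    · rw [pvColH, if_pos h, List.findIdx?_cons, if_pos h]
      simp
    · rw [pvColH, if_neg h, List.findIdx?_cons, if_neg h, ih]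
      cases hf : rest.findIdx? (pvCell i) with
      | none => simp
      | some k => simp; ring

theorem foldl_max_le {g : Nat → Int} {M a : Int} (l : List Nat)
    (hg : ∀ i ∈ l, g i ≤ M) (ha : a ≤ M) :
    l.foldl (fun m i => max m (g i)) a ≤ M := by
  induction l generalizing a with
  | nil => simpa using ha
  | cons x xs ih =>
    simp only [List.foldl_cons]
    exact ih (fun i hi => hg i (List.mem_cons_of_mem _ hi))
      (max_le ha (hg x (List.mem_cons_self)))

theorem le_foldl_max {g : Nat → Int} (l : List Nat) (a : Int) :
    a ≤ l.foldl (fun m i => max m (g i)) a := by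
  induction l generalizing a with
  | nil => simp
  | cons x xs ih =>
    simp only [List.foldl_cons]
    exact le_trans (le_max_left a (g x)) (ih _)

theorem mem_le_foldl_max {g : Nat → Int} {l : List Nat} {i : Nat} (hi : i ∈ l) (a : Int) :
    g i ≤ l.foldl (fun m i => max m (g i)) a := by
  induction l generalizing a with
  | nil => cases hi
  | cons x xs ih =>
    simp only [List.foldl_cons]
    rcases List.mem_cons.mp hi with h | h
    · subst h; exact le_trans (le_max_right a (g i)) (le_foldl_max _ _)
    · exact ih h _

-- a row hits iff some column < width hits it
theorem rowHit_iff (width : Nat) (row : List Int) :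
    pvRowHit width row = true ↔ ∃ i, i < width ∧ pvCell i row = true := by
  simp [pvRowHit, List.any_eq_true, List.mem_range]

-- ===== VERDICT (by name: the statement is the Claim_ definition above) =====
theorem get_max_height_spec : Claim_equal_get_max_height := by
  intro board _ _
  unfold Spec_get_max_height get_max_height get_max_height_alt
  rw [pvGoA_char]
  cases hf : board.findIdx? (pvRowHit (board.headD []).length) with
  | none =>
    have hnone : ∀ i ∈ List.range (board.headD []).length,
        pvColH (board.length : Int) i board 0 = 0 := by
      intro i hi
      rw [pvColH_char]
      have hcol : board.findIdx? (pvCell i) = none := by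
        rw [List.findIdx?_eq_none_iff]
        intro row hrow
        have hno := List.findIdx?_eq_none_iff.mp hf row hrow
        by_contra hcon
        simp only [Bool.not_eq_false] at hcon
        exact absurd ((rowHit_iff _ _).mpr ⟨i, List.mem_range.mp hi, hcon⟩)
          (by simpa using hno)
      rw [hcol]
    rw [le_antisymm (foldl_max_le _ (fun i hi => le_of_eq (hnone i hi)) le_rfl)
      (le_foldl_max _ _)]
  | some k =>
    obtain ⟨hk, hhit, hbefore⟩ := List.findIdx?_eq_some_iff_getElem.mp hf
    have hM0 : (0 : Int) ≤ (board.length : Int) - k := by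
      have : (k : Int) < (board.length : Int) := by exact_mod_cast hk
      omega
    obtain ⟨i0, hi0w, hi0⟩ := (rowHit_iff _ _).mp hhit
    have hle : ∀ i ∈ List.range (board.headD []).length,
        pvColH (board.length : Int) i board 0 ≤ (board.length : Int) - k := by
      intro i hi
      rw [pvColH_char]
      cases hfi : board.findIdx? (pvCell i) with
      | none => exact hM0
      | some m =>
        obtain ⟨hm, hmhit, _⟩ := List.findIdx?_eq_some_iff_getElem.mp hfi
        have hkm : k ≤ m := by
          by_contra hlt
          push Not at hlt
          exact absurd ((rowHit_iff _ _).mpr ⟨i, List.mem_range.mp hi, hmhit⟩)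
            (hbefore m hlt)
        have hkm' : (k : Int) ≤ (m : Int) := by exact_mod_cast hkm
        show (board.length : Int) - (0 + (m : Int)) ≤ (board.length : Int) - k
        omega
    have heq : pvColH (board.length : Int) i0 board 0 = (board.length : Int) - k := by
      rw [pvColH_char]
      have hcol : board.findIdx? (pvCell i0) = some k := by
        apply List.findIdx?_eq_some_iff_getElem.mpr
        refine ⟨hk, hi0, ?_⟩
        intro m hm hcon
        exact absurd ((rowHit_iff _ _).mpr ⟨i0, hi0w, hcon⟩) (hbefore m hm)
      rw [hcol]
      show (board.length : Int) - (0 + (k : Int)) = (board.length : Int) - k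
      omega
    have hi0mem : i0 ∈ List.range (board.headD []).length := List.mem_range.mpr hi0w
    rw [le_antisymm (foldl_max_le _ hle hM0) (heq ▸ mem_le_foldl_max hi0mem 0)]
    show (board.length : Int) - ((0:Int) + (k : Int)) = (board.length : Int) - k
    omega
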